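-- pv_equiv track=rewrite | github.com/mathilde-ritman/acp_submission | scripts/global3d_track/scripts/src/methods/share_labels.py | proc_optimized
-- ===== SOURCE A (Python) =====
-- def proc_optimized(list_A, list_B):
--     min_values = {}
--     for i, j in zip(list_A, list_B):
--         if i in min_values:
--             min_values[i] = min(min_values[i], j)  # Update to min j
--         else:
--             min_values[i] = j  # First occurrence of i
--     unique_A = list(min_values.keys())
--     unique_B = list(min_values.values())
--     return unique_A, unique_B
-- ===== SOURCE B (Python) =====
-- def proc_optimized(list_A, list_B):
--     groups = {}
--     for i, j in zip(list_A, list_B):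
--         groups.setdefault(i, []).append(j)
--     unique_A = list(groups)
--     unique_B = [min(v) for v in groups.values()]
--     return unique_A, unique_B
-- ===== Notes on version B (the rewrite author's own statement) =====
-- stated objective: alternative
-- what changed: A keeps a running min per key inline in the loop; B first groups all j's per key into a dict of lists (one collect pass with setdefault/append) and then reduces each group with min in a second pass.
import Mathlib
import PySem

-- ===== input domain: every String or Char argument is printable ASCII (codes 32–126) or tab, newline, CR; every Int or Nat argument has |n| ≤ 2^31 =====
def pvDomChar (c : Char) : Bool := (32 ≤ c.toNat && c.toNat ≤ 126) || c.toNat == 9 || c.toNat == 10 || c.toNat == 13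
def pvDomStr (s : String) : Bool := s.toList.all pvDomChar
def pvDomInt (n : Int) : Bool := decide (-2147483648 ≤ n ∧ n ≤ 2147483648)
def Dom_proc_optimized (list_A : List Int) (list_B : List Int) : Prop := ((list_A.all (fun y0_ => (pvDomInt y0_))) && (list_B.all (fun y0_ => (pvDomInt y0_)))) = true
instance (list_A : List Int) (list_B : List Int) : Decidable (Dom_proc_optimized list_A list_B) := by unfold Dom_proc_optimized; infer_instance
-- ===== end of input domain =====

-- B replaces A's inline running-min update with a two-pass shape: collect every j per key
-- into a dict of lists, then reduce each group with min (alternative decomposition, same cost).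


-- ===== PORT A =====
-- loop body: `if i in min_values: min_values[i] = min(min_values[i], j) else: min_values[i] = j`
-- (membership + read ported together via get?)
def stepA (d : PySem.Dict Int Int) (p : Int × Int) : PySem.Dict Int Int :=
  match d.get? p.1 with
  | some m => d.insert p.1 (min m p.2)
  | none => d.insert p.1 p.2

def proc_optimized (list_A : List Int) (list_B : List Int) : List Int × List Int :=
  let min_values := (list_A.zip list_B).foldl stepA PySem.Dict.empty
  (min_values.keys, min_values.values)

-- ===== PORT B =====
-- loop body: `groups.setdefault(i, []).append(j)` — the in-place append keeps the key's
-- position, i.e. it is insert of (current list, default []) ++ [j]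
def stepB (g : PySem.Dict Int (List Int)) (p : Int × Int) : PySem.Dict Int (List Int) :=
  g.insert p.1 (g.getD p.1 [] ++ [p.2])

def proc_optimized_alt (list_A : List Int) (list_B : List Int) : List Int × List Int :=
  let groups := (list_A.zip list_B).foldl stepB PySem.Dict.empty
  (groups.keys,
   -- min(v): every group list is nonempty, so the `none` branch is unreachable
   groups.values.map (fun v => match PySem.List.min? v (fun y => y) with | some m => m | none => 0))

-- ===== PRECONDITION & SPEC =====
def Spec_proc_optimized (list_A : List Int) (list_B : List Int) (out : List Int × List Int) : Prop := out = proc_optimized_alt list_A list_B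
instance (list_A : List Int) (list_B : List Int) (out : List Int × List Int) : Decidable (Spec_proc_optimized list_A list_B out) := by unfold Spec_proc_optimized; infer_instance

-- ===== CLAIM (what is proved, stated in full; the proofs are below) =====
def Claim_equal_proc_optimized : Prop := ∀ (list_A : List Int) (list_B : List Int), Dom_proc_optimized list_A list_B → Spec_proc_optimized list_A list_B (proc_optimized list_A list_B)

-- ===== LEMMAS AND PROOFS =====

-- min of a nonempty list as A's loop computes it (0 is an arbitrary value for [])
def lmin : List Int → Int
  | [] => 0
  | x :: t => t.foldl min x

-- A's dict is B's dict with every group list reduced by lmin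
def mapV (g : PySem.Dict Int (List Int)) : PySem.Dict Int Int :=
  PySem.Dict.mk (g.items.map (fun p => (p.1, lmin p.2)))

theorem lmin_append (v : List Int) (j : Int) (h : v ≠ []) : lmin (v ++ [j]) = min (lmin v) j := by
  cases v with
  | nil => exact absurd rfl h
  | cons x t => simp [lmin, List.foldl_append]

theorem get?_mapV (g : PySem.Dict Int (List Int)) (k : Int) :
    (mapV g).get? k = (g.get? k).map lmin := by
  simp [mapV, PySem.Dict.get?, List.find?_map, Function.comp_def]

theorem contains_mapV (g : PySem.Dict Int (List Int)) (k : Int) :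
    (mapV g).contains k = g.contains k := by
  simp [mapV, PySem.Dict.contains, List.any_map, Function.comp_def]

theorem step_comm (g : PySem.Dict Int (List Int)) (p : Int × Int)
    (h : ∀ q ∈ g.items, q.2 ≠ []) : stepA (mapV g) p = mapV (stepB g p) := by
  unfold stepA stepB
  rw [get?_mapV]
  cases hg : g.get? p.1 with
  | none =>
      have hc : ∀ q ∈ g.items, ¬ q.1 = p.1 := by
        simp only [PySem.Dict.get?, Option.map_eq_none_iff, List.find?_eq_none] at hg
        intro q hq
        simpa using hg q hq
      have hc' : (g.items.any (fun q => q.1 == p.1)) = false := by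
        simp only [List.any_eq_false, beq_iff_eq]
        exact hc
      simp [PySem.Dict.insert, PySem.Dict.getD, PySem.Dict.contains, hg, mapV, lmin,
        List.any_map, Function.comp_def, hc']
  | some v =>
      obtain ⟨q0, hfind⟩ : ∃ q0, g.items.find? (fun q => q.1 == p.1) = some q0 := by
        simp only [PySem.Dict.get?] at hg
        cases hf : g.items.find? (fun q => q.1 == p.1) with
        | none => simp [hf] at hg
        | some q0 => exact ⟨q0, rfl⟩
      have hq0mem : q0 ∈ g.items := List.mem_of_find?_eq_some hfind
      have hv : q0.2 = v := by
        simp only [PySem.Dict.get?, hfind, Option.map_some, Option.some.injEq] at hg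
        exact hg
      have hvne : v ≠ [] := hv ▸ h q0 hq0mem
      have hc : g.contains p.1 = true := by
        have := List.find?_some hfind
        simp only [PySem.Dict.contains, List.any_eq_true]
        exact ⟨q0, hq0mem, this⟩
      have hgd : g.getD p.1 [] = v := by simp [PySem.Dict.getD, hg]
      simp only [Option.map_some, PySem.Dict.insert, contains_mapV, hc, if_pos, hgd]
      simp only [mapV, List.map_map]
      congr 1
      apply List.map_congr_left
      intro q hq
      by_cases hk : q.1 = p.1
      · simp [hk, lmin_append v p.2 hvne]
      · simp [hk]

theorem step_ne_nil (g : PySem.Dict Int (List Int)) (p : Int × Int)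
    (h : ∀ q ∈ g.items, q.2 ≠ []) : ∀ q ∈ (stepB g p).items, q.2 ≠ [] := by
  unfold stepB
  simp only [PySem.Dict.insert]
  split
  · intro q hq
    rw [List.mem_map] at hq
    obtain ⟨q', hq', hEq⟩ := hq
    subst hEq
    split
    · simp
    · exact h q' hq'
  · intro q hq
    rcases List.mem_append.mp hq with hq | hq
    · exact h q hq
    · simp at hq; subst hq; simp

theorem fold_comm (ps : List (Int × Int)) (g : PySem.Dict Int (List Int))
    (h : ∀ q ∈ g.items, q.2 ≠ []) :
    ps.foldl stepA (mapV g) = mapV (ps.foldl stepB g) := by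
  induction ps generalizing g with
  | nil => rfl
  | cons p ps ih =>
      simp only [List.foldl_cons, step_comm g p h]
      exact ih _ (step_ne_nil g p h)

theorem fold_ne_nil (ps : List (Int × Int)) (g : PySem.Dict Int (List Int))
    (h : ∀ q ∈ g.items, q.2 ≠ []) : ∀ q ∈ (ps.foldl stepB g).items, q.2 ≠ [] := by
  induction ps generalizing g with
  | nil => exact h
  | cons p ps ih => exact ih _ (step_ne_nil g p h)

-- ===== VERDICT (by name: the statement is the Claim_ definition above) =====
theorem proc_optimized_spec : Claim_equal_proc_optimized := by
  intro list_A list_B _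
  unfold Spec_proc_optimized proc_optimized proc_optimized_alt
  have hfold : (list_A.zip list_B).foldl stepA PySem.Dict.empty
      = mapV ((list_A.zip list_B).foldl stepB PySem.Dict.empty) :=
    fold_comm _ PySem.Dict.empty (by intro q hq; simp [PySem.Dict.empty] at hq)
  have hne := fold_ne_nil (list_A.zip list_B) PySem.Dict.empty
    (by intro q hq; simp [PySem.Dict.empty] at hq)
  set g := (list_A.zip list_B).foldl stepB PySem.Dict.empty with hg
  rw [hfold]
  refine Prod.ext ?_ ?_
  · simp [mapV, PySem.Dict.keys, Function.comp_def]
  · simp only [mapV, PySem.Dict.values, List.map_map]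
    apply List.map_congr_left
    intro q hq
    have := hne q hq
    cases hv : q.2 with
    | nil => exact absurd hv this
    | cons x t => simp [hv, lmin, PySem.List.min?_id_cons]
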